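-- pv_equiv track=rewrite | github.com/isectec/isectech-security | ai-services/services/threat-detection-ml/integrations/siem/correlation_engine.py | _check_attack_chain_correlation
-- ===== SOURCE A (Python) =====
-- from typing import Dict, List, Optional, Any, Set, Tuple, Union
--
-- def _check_attack_chain_correlation(
--
--     patterns1: Set[str],
--     patterns2: Set[str]
-- ) -> bool:
--     """Check if attack patterns form a logical chain"""
--     # Define attack chain sequences
--     attack_chains = [
--         ['reconnaissance', 'initial_access', 'execution'],
--         ['initial_access', 'persistence', 'privilege_escalation'],
--         ['credential_access', 'lateral_movement', 'collection'],
--         ['collection', 'exfiltration']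
--     ]
--
--     for chain in attack_chains:
--         for i in range(len(chain) - 1):
--             if chain[i] in patterns1 and chain[i + 1] in patterns2:
--                 return True
--             if chain[i] in patterns2 and chain[i + 1] in patterns1:
--                 return True
--
--     return bool(patterns1.intersection(patterns2))
-- ===== SOURCE B (Python) =====
-- def _check_attack_chain_correlation(patterns1, patterns2):
--     """Check if attack patterns form a logical chain"""
--     attack_chains = [
--         ['reconnaissance', 'initial_access', 'execution'],
--         ['initial_access', 'persistence', 'privilege_escalation'],
--         ['credential_access', 'lateral_movement', 'collection'],
--         ['collection', 'exfiltration']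
--     ]
--     neighbors = {}
--     for chain in attack_chains:
--         for a, b in zip(chain, chain[1:]):
--             neighbors.setdefault(a, set()).add(b)
--             neighbors.setdefault(b, set()).add(a)
--     if any(neighbors.get(p, set()) & patterns2 for p in patterns1):
--         return True
--     return bool(patterns1 & patterns2)
-- ===== Notes on version B (the rewrite author's own statement) =====
-- stated objective: idiomatic
-- what changed: Instead of scanning the fixed chain table pair-by-pair against both sets, B builds an undirected adjacency index from the chains once and then scans the input sets against that index (any pattern in patterns1 whose neighbor set intersects patterns2), falling back to plain set intersection.
import Mathlib
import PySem

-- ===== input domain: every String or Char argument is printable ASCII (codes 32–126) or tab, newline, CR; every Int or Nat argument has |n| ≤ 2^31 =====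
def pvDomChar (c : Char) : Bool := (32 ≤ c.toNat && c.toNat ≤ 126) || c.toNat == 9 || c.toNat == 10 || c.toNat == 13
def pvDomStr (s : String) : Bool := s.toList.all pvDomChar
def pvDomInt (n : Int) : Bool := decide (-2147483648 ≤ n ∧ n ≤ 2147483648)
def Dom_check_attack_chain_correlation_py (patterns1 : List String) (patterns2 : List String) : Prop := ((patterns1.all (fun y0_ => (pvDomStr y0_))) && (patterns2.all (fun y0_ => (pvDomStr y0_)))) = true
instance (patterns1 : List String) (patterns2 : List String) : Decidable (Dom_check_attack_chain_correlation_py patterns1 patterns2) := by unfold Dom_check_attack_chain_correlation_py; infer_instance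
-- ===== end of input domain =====

-- B replaces A's pair-by-pair scan of the fixed chain table with a prebuilt undirected
-- adjacency index that the input sets are scanned against (objective: idiomatic).

-- B replaces A's pair-by-pair scan of the fixed chain table with a prebuilt undirected
-- adjacency index that the input sets are scanned against (objective: idiomatic).

-- ===== PORT A =====
-- the hard-coded attack_chains table
def pvChains : List (List String) :=
  [["reconnaissance", "initial_access", "execution"],
   ["initial_access", "persistence", "privilege_escalation"],
   ["credential_access", "lateral_movement", "collection"],
   ["collection", "exfiltration"]]

-- inner loop: for i in range(len(chain) - 1): … (early 'return True' ported as returning true)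
def pvAInner (patterns1 patterns2 chain : List String) : List Int → Bool
  | [] => false
  | i :: rest =>
    if patterns1.contains (PySem.List.pyGetD chain i "") &&
       patterns2.contains (PySem.List.pyGetD chain (i + 1) "") then true
    else if patterns2.contains (PySem.List.pyGetD chain i "") &&
            patterns1.contains (PySem.List.pyGetD chain (i + 1) "") then true
    else pvAInner patterns1 patterns2 chain rest

-- outer loop: for chain in attack_chains: …; falls through to bool(patterns1.intersection(patterns2))
def pvAOuter (patterns1 patterns2 : List String) : List (List String) → Bool
  | [] => !(PySem.Set.inter (PySem.Set.ofList patterns1) patterns2).isEmpty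
  | chain :: rest =>
    if pvAInner patterns1 patterns2 chain
         (PySem.List.pyRange 0 (PySem.List.len chain - 1) 1) then true
    else pvAOuter patterns1 patterns2 rest

def check_attack_chain_correlation_py (patterns1 : List String) (patterns2 : List String) : Bool :=
  pvAOuter patterns1 patterns2 pvChains

-- ===== PORT B =====
-- neighbors: the undirected adjacency dict built once from the chains
-- (setdefault(k, set()).add(x) is Dict.modify with default Set.empty)
def pvNeighbors : PySem.Dict String (PySem.Set String) :=
  pvChains.foldl
    (fun d chain =>
      (chain.zip chain.tail).foldl
        (fun d ab =>
          let d := PySem.Dict.modify d ab.1 PySem.Set.empty (fun s => PySem.Set.add s ab.2)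
          PySem.Dict.modify d ab.2 PySem.Set.empty (fun s => PySem.Set.add s ab.1))
        d)
    PySem.Dict.empty

def check_attack_chain_correlation_py_alt (patterns1 : List String) (patterns2 : List String) : Bool :=
  if patterns1.any (fun p =>
       !(PySem.Set.inter (PySem.Dict.getD pvNeighbors p PySem.Set.empty) patterns2).isEmpty)
  then true
  else !(PySem.Set.inter (PySem.Set.ofList patterns1) patterns2).isEmpty

-- ===== PRECONDITION & SPEC =====
def Spec_check_attack_chain_correlation_py (patterns1 : List String) (patterns2 : List String) (out : Bool) : Prop := out = check_attack_chain_correlation_py_alt patterns1 patterns2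
instance (patterns1 : List String) (patterns2 : List String) (out : Bool) : Decidable (Spec_check_attack_chain_correlation_py patterns1 patterns2 out) := by unfold Spec_check_attack_chain_correlation_py; infer_instance

-- ===== CLAIM (what is proved, stated in full; the proofs are below) =====
def Claim_equal_check_attack_chain_correlation_py : Prop := ∀ (patterns1 : List String) (patterns2 : List String), Dom_check_attack_chain_correlation_py patterns1 patterns2 → Spec_check_attack_chain_correlation_py patterns1 patterns2 (check_attack_chain_correlation_py patterns1 patterns2)

-- ===== LEMMAS AND PROOFS =====

theorem pv_not_isEmpty_inter (s t : List String) :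
    (!(PySem.Set.inter s t).isEmpty) = s.any (fun x => t.contains x) := by
  induction s with
  | nil => simp [PySem.Set.inter]
  | cons x xs ih =>
    simp only [PySem.Set.inter] at *
    by_cases hx : t.contains x
    · simp_all
    · simp_all

theorem pv_any_step (l : List String) (k : String) (b : Bool) (g : String → Bool)
    (hg : g k = false) :
    (l.any (fun p => if k == p then b else g p)) = ((l.contains k && b) || l.any g) := by
  rw [Bool.eq_iff_iff]
  simp only [List.any_eq_true, Bool.or_eq_true, Bool.and_eq_true, List.contains_eq_mem,
    decide_eq_true_eq, beq_iff_eq]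
  constructor
  · rintro ⟨p, hp, hcond⟩
    by_cases hpk : k = p
    · subst hpk
      rw [if_pos rfl] at hcond
      exact Or.inl ⟨hp, hcond⟩
    · rw [if_neg hpk] at hcond
      exact Or.inr ⟨p, hp, hcond⟩
  · rintro (⟨hk, hb⟩ | ⟨p, hp, hgp⟩)
    · exact ⟨k, hk, by simp [hb]⟩
    · refine ⟨p, hp, ?_⟩
      by_cases hpk : k = p
      · subst hpk; rw [hg] at hgp; exact absurd hgp (by simp)
      · rw [if_neg hpk]; exact hgp

theorem pv_any_lookup (l : List String) (p2 : List String) (tbl : List (String × List String))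
    (hnd : (tbl.map Prod.fst).Nodup) :
    (l.any (fun p =>
       !(PySem.Set.inter ((Option.map (fun x => x.2) (List.find? (fun q => q.1 == p) tbl)).getD []) p2).isEmpty))
    = tbl.any (fun kv => l.contains kv.1 && kv.2.any (fun n => p2.contains n)) := by
  induction tbl with
  | nil => simp [PySem.Set.inter]
  | cons kv t ih =>
    obtain ⟨k, ns⟩ := kv
    simp only [List.map_cons, List.nodup_cons] at hnd
    have hknot : k ∉ t.map Prod.fst := hnd.1
    have hfind : List.find? (fun q => q.1 == k) t = none := by
      rw [List.find?_eq_none]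
      intro q hq hbeq
      have : q.1 = k := by simpa using hbeq
      exact hknot (List.mem_map.mpr ⟨q, hq, this⟩)
    have hstep := pv_any_step l k (!(PySem.Set.inter ns p2).isEmpty)
      (fun p => !(PySem.Set.inter ((Option.map (fun x => x.2) (List.find? (fun q => q.1 == p) t)).getD []) p2).isEmpty)
      (by simp [hfind, PySem.Set.inter])
    calc (l.any fun p => !(PySem.Set.inter ((Option.map (fun x => x.2) (List.find? (fun q => q.1 == p) ((k, ns) :: t))).getD []) p2).isEmpty)
        = (l.any fun p => if k == p then !(PySem.Set.inter ns p2).isEmpty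
            else !(PySem.Set.inter ((Option.map (fun x => x.2) (List.find? (fun q => q.1 == p) t)).getD []) p2).isEmpty) := by
          refine List.any_congr rfl (fun p => ?_)
          by_cases hk : k = p <;> simp [hk]
      _ = _ := by
          rw [hstep, ih hnd.2]
          simp [pv_not_isEmpty_inter]

theorem pv_equiv (p1 p2 : List String) :
    check_attack_chain_correlation_py p1 p2 = check_attack_chain_correlation_py_alt p1 p2 := by
  have hN : pvNeighbors = PySem.Dict.mk [("reconnaissance", ["initial_access"]),
            ("initial_access", ["reconnaissance", "execution", "persistence"]),
            ("execution", ["initial_access"]),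
            ("persistence", ["initial_access", "privilege_escalation"]),
            ("privilege_escalation", ["persistence"]),
            ("credential_access", ["lateral_movement"]),
            ("lateral_movement", ["credential_access", "collection"]),
            ("collection", ["lateral_movement", "exfiltration"]),
            ("exfiltration", ["collection"])] := by decide
  have hB := pv_any_lookup p1 p2 [("reconnaissance", ["initial_access"]),
            ("initial_access", ["reconnaissance", "execution", "persistence"]),
            ("execution", ["initial_access"]),
            ("persistence", ["initial_access", "privilege_escalation"]),
            ("privilege_escalation", ["persistence"]),
            ("credential_access", ["lateral_movement"]),
            ("lateral_movement", ["credential_access", "collection"]),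
            ("collection", ["lateral_movement", "exfiltration"]),
            ("exfiltration", ["collection"])] (by decide)
  simp only [check_attack_chain_correlation_py, check_attack_chain_correlation_py_alt, pvChains,
    pvAOuter, hN, PySem.Dict.getD, PySem.Dict.get?, PySem.Set.empty]
  rw [show PySem.List.pyRange 0 (PySem.List.len ["reconnaissance", "initial_access", "execution"] - 1) 1 = [0, 1] from by decide,
      show PySem.List.pyRange 0 (PySem.List.len ["initial_access", "persistence", "privilege_escalation"] - 1) 1 = [0, 1] from by decide,
      show PySem.List.pyRange 0 (PySem.List.len ["credential_access", "lateral_movement", "collection"] - 1) 1 = [0, 1] from by decide,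
      show PySem.List.pyRange 0 (PySem.List.len ["collection", "exfiltration"] - 1) 1 = [0] from by decide,
      hB]
  simp only [pvAInner, List.any_cons, List.any_nil,
    show PySem.List.pyGetD ["reconnaissance", "initial_access", "execution"] 0 "" = "reconnaissance" from by decide,
    show PySem.List.pyGetD ["reconnaissance", "initial_access", "execution"] (0+1) "" = "initial_access" from by decide,
    show PySem.List.pyGetD ["reconnaissance", "initial_access", "execution"] 1 "" = "initial_access" from by decide,
    show PySem.List.pyGetD ["reconnaissance", "initial_access", "execution"] (1+1) "" = "execution" from by decide,
    show PySem.List.pyGetD ["initial_access", "persistence", "privilege_escalation"] 0 "" = "initial_access" from by decide,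
    show PySem.List.pyGetD ["initial_access", "persistence", "privilege_escalation"] (0+1) "" = "persistence" from by decide,
    show PySem.List.pyGetD ["initial_access", "persistence", "privilege_escalation"] 1 "" = "persistence" from by decide,
    show PySem.List.pyGetD ["initial_access", "persistence", "privilege_escalation"] (1+1) "" = "privilege_escalation" from by decide,
    show PySem.List.pyGetD ["credential_access", "lateral_movement", "collection"] 0 "" = "credential_access" from by decide,
    show PySem.List.pyGetD ["credential_access", "lateral_movement", "collection"] (0+1) "" = "lateral_movement" from by decide,
    show PySem.List.pyGetD ["credential_access", "lateral_movement", "collection"] 1 "" = "lateral_movement" from by decide,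
    show PySem.List.pyGetD ["credential_access", "lateral_movement", "collection"] (1+1) "" = "collection" from by decide,
    show PySem.List.pyGetD ["collection", "exfiltration"] 0 "" = "collection" from by decide,
    show PySem.List.pyGetD ["collection", "exfiltration"] (0+1) "" = "exfiltration" from by decide]
  simp only [Bool.if_true_left, Bool.decide_eq_true, Bool.or_false, Bool.and_or_distrib_left]
  rw [show (p2.contains "reconnaissance" && p1.contains "initial_access") = (p1.contains "initial_access" && p2.contains "reconnaissance") from Bool.and_comm _ _,
      show (p2.contains "initial_access" && p1.contains "execution") = (p1.contains "execution" && p2.contains "initial_access") from Bool.and_comm _ _,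
      show (p2.contains "initial_access" && p1.contains "persistence") = (p1.contains "persistence" && p2.contains "initial_access") from Bool.and_comm _ _,
      show (p2.contains "persistence" && p1.contains "privilege_escalation") = (p1.contains "privilege_escalation" && p2.contains "persistence") from Bool.and_comm _ _,
      show (p2.contains "credential_access" && p1.contains "lateral_movement") = (p1.contains "lateral_movement" && p2.contains "credential_access") from Bool.and_comm _ _,
      show (p2.contains "lateral_movement" && p1.contains "collection") = (p1.contains "collection" && p2.contains "lateral_movement") from Bool.and_comm _ _,
      show (p2.contains "collection" && p1.contains "exfiltration") = (p1.contains "exfiltration" && p2.contains "collection") from Bool.and_comm _ _]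
  ac_rfl

-- ===== VERDICT (by name: the statement is the Claim_ definition above) =====
theorem check_attack_chain_correlation_py_spec : Claim_equal_check_attack_chain_correlation_py := by
  intro p1 p2 _
  unfold Spec_check_attack_chain_correlation_py
  exact pv_equiv p1 p2
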